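-- pv_equiv track=rewrite | github.com/wxgeo/ptyx | extensions/autoqcm2/header.py | set_up_ID_table
-- ===== SOURCE A (Python) =====
-- def set_up_ID_table(ids):
--     ID_length = max(len(iD) for iD in ids)
--     # On crée la liste de l'ensemble des valeurs possibles pour chaque chiffre.
--     digits = [set() for i in range(ID_length)]
--     for iD in ids:
--         for i, digit in enumerate(iD):
--             digits[i].add(digit)
--
--     max_digits = max(len(s) for s in digits)
--     return ID_length, max_digits, digits
-- ===== SOURCE B (Python) =====
-- def _merge(cols, iD):
--     # Zip the id's characters into the existing column sets, keeping whichever tail is longer.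
--     k = min(len(cols), len(iD))
--     return [s | {c} for s, c in zip(cols, iD)] + cols[k:] + [{c} for c in iD[k:]]
--
--
-- def set_up_ID_table(ids):
--     # Fold the ids into a ragged zip-merge accumulator: no pre-allocation, no indexing.
--     digits = []
--     for iD in ids:
--         digits = _merge(digits, iD)
--     ID_length = len(digits)
--     max_digits = max(len(s) for s in digits)
--     return ID_length, max_digits, digits
-- ===== Notes on version B (the rewrite author's own statement) =====
-- stated objective: alternative
-- what changed: A precomputes max(len) to pre-allocate an indexed list of sets and mutates digits[i] inside nested loops; B never computes the max or uses an index: it folds the ids through a ragged zip-merge that unions each id character-wise into the accumulated columns, and derives ID_length as len(digits).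
import Mathlib
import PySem

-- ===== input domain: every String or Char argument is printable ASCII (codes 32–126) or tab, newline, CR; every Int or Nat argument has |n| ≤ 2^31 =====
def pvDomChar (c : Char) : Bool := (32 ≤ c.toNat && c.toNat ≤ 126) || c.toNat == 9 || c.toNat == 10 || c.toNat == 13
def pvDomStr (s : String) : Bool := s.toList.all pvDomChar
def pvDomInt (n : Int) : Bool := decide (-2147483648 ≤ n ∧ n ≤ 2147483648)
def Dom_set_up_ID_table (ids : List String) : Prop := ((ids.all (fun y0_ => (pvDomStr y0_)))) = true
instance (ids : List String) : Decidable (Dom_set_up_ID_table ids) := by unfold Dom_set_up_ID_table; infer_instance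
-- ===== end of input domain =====

-- B replaces A's pre-allocated, index-mutated list of sets by a ragged zip-merge fold over
-- the ids (no max-length precomputation, no indexing); alternative decomposition, same cost.


-- ===== PORT A =====
-- one in-place update digits[i].add(digit) (a list cell mutated at index i)
def pvAStep (ds : List (List String)) (p : Int × Char) : List (List String) :=
  PySem.List.pySetD ds p.1 (PySem.Set.add (PySem.List.pyGetD ds p.1 PySem.Set.empty) (String.mk [p.2]))

def set_up_ID_table (ids : List String) : Int × Int × List (List String) :=
  let ID_length : Int := (PySem.List.max? (ids.map (fun iD => PySem.Str.len iD)) (fun x => x)).getD 0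
  let digits0 : List (List String) := (PySem.List.pyRange 0 ID_length).map (fun _ => PySem.Set.empty)
  let digits : List (List String) := ids.foldl
    (fun ds iD => (PySem.List.enumerate iD.toList).foldl pvAStep ds) digits0
  let max_digits : Int := (PySem.List.max? (digits.map (fun s => PySem.Set.len s)) (fun x => x)).getD 0
  (ID_length, max_digits, digits)

-- ===== PORT B =====
-- _merge(cols, iD): [s | {c} for s, c in zip(cols, iD)] + cols[k:] + [{c} for c in iD[k:]]
-- (the slices cols[k:], iD[k:] with 0 ≤ k = min of the lengths are exactly List.drop k)
def pvMerge (cols : List (List String)) (cs : List Char) : List (List String) :=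
  let k := min cols.length cs.length
  ((cols.zip cs).map (fun p => PySem.Set.union p.1 [String.mk [p.2]]))
    ++ cols.drop k
    ++ (cs.drop k).map (fun c => [String.mk [c]])

def set_up_ID_table_alt (ids : List String) : Int × Int × List (List String) :=
  let digits : List (List String) := ids.foldl (fun cols iD => pvMerge cols iD.toList) []
  let ID_length : Int := (digits.length : Int)
  let max_digits : Int := (PySem.List.max? (digits.map (fun s => PySem.Set.len s)) (fun x => x)).getD 0
  (ID_length, max_digits, digits)

-- ===== PRECONDITION & SPEC =====
-- Pre_ excludes exactly the inputs where Python A raises ValueError (max() of an empty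
-- sequence): ids empty, or every id the empty string (then digits is empty).
def Pre_set_up_ID_table (ids : List String) : Prop := (ids.any (fun s => !s.toList.isEmpty)) = true
instance (ids : List String) : Decidable (Pre_set_up_ID_table ids) := by unfold Pre_set_up_ID_table; infer_instance

def pvWitness_set_up_ID_table : List String := ["ab", "ac", "b"]

def Spec_set_up_ID_table (ids : List String) (out : Int × Int × List (List String)) : Prop := out = set_up_ID_table_alt ids
instance (ids : List String) (out : Int × Int × List (List String)) : Decidable (Spec_set_up_ID_table ids out) := by unfold Spec_set_up_ID_table; infer_instance

-- ===== CLAIM (what is proved, stated in full; the proofs are below) =====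
def Claim_equal_set_up_ID_table : Prop := ∀ (ids : List String), Dom_set_up_ID_table ids → Pre_set_up_ID_table ids → Spec_set_up_ID_table ids (set_up_ID_table ids)

-- ===== LEMMAS AND PROOFS =====

theorem pvRange_nil (L : Int) (hneg : L < 0) : PySem.List.pyRange 0 L = [] := by
  simp [PySem.List.pyRange]
  omega

theorem pvRange_len (L : Int) : (PySem.List.pyRange 0 L).length = L.toNat := by
  by_cases hpos : 0 ≤ L
  · have h : L = ((L.toNat : Nat) : Int) := by omega
    rw [h, PySem.List.pyRange_zero_natCast]
    simp
    omega
  · rw [pvRange_nil L (by omega)]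
    simp
    omega

theorem pvRange_get (L : Int) (j : Nat) (hj : j < L.toNat) :
    (PySem.List.pyRange 0 L)[j]? = some ((j : Nat) : Int) := by
  have hpos : 0 ≤ L := by omega
  have h : L = ((L.toNat : Nat) : Int) := by omega
  rw [h, PySem.List.pyRange_zero_natCast]
  simp [hj]

-- effect of A's inner loop (one id) on cell j, plus length preservation
theorem pvA_inner_length (cs : List Char) (n : Int) (ds : List (List String)) :
    ((PySem.List.enumerate cs n).foldl pvAStep ds).length = ds.length := by
  induction cs generalizing n ds with
  | nil => simp [PySem.List.enumerate]
  | cons c cs ih =>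
      rw [PySem.List.enumerate_cons]
      simp only [List.foldl_cons]
      rw [ih]
      simp [pvAStep, PySem.List.length_pySetD]

theorem pvA_inner_get (cs : List Char) (k : Nat) (ds : List (List String))
    (hk : k + cs.length ≤ ds.length) (j : Nat) (hj : j < ds.length) :
    ((PySem.List.enumerate cs (k : Int)).foldl pvAStep ds)[j]? =
      some (match (if k ≤ j then cs[j - k]? else none) with
            | some c => PySem.Set.add (ds.getD j PySem.Set.empty) (String.mk [c])
            | none => ds.getD j PySem.Set.empty) := by
  induction cs generalizing k ds with
  | nil =>
      simp only [PySem.List.enumerate, List.foldl_nil]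
      have h0 : (if k ≤ j then (([] : List Char))[j - k]? else none) = none := by
        split <;> simp
      rw [h0]
      simp [List.getD_eq_getElem?_getD, List.getElem?_eq_getElem hj]
  | cons c cs ih =>
      rw [PySem.List.enumerate_cons]
      simp only [List.foldl_cons]
      have hkd : k < ds.length := by simp at hk; omega
      have hstep : pvAStep ds ((k : Int), c)
          = ds.set k (PySem.Set.add (ds.getD k PySem.Set.empty) (String.mk [c])) := by
        simp [pvAStep, PySem.List.pySetD_natCast, PySem.List.pyGetD_natCast]
      have hk1 : ((k : Int)) + 1 = ((k + 1 : Nat) : Int) := by push_cast; ring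
      rw [hstep, hk1, ih (k + 1) _ (by simp at hk ⊢; omega) (by simpa using hj)]
      by_cases hlek : k ≤ j
      · by_cases hejk : j = k
        · subst hejk
          simp [List.getD_eq_getElem?_getD, hkd]
        · have h1 : k + 1 ≤ j := by omega
          have h2 : j - k = (j - (k + 1)) + 1 := by omega
          simp only [hlek, h1, if_pos, h2, List.getElem?_cons_succ]
          rw [List.getD_eq_getElem?_getD, List.getElem?_set_ne (by omega), ← List.getD_eq_getElem?_getD]
      · have h1 : ¬ (k + 1 ≤ j) := by omega
        simp only [hlek, h1, if_neg, not_false_iff]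
        rw [List.getD_eq_getElem?_getD, List.getElem?_set_ne (by omega), ← List.getD_eq_getElem?_getD]

theorem pvA_outer_length (ids : List String) (ds : List (List String)) :
    (ids.foldl (fun ds iD => (PySem.List.enumerate iD.toList).foldl pvAStep ds) ds).length
      = ds.length := by
  induction ids generalizing ds with
  | nil => rfl
  | cons iD ids ih =>
      simp only [List.foldl_cons]
      rw [ih, pvA_inner_length]

-- loop interchange: cell j of A's double loop is the single column fold started at ds[j]
theorem pvA_exchange (ids : List String) (ds : List (List String))
    (h : ∀ iD ∈ ids, iD.toList.length ≤ ds.length) (j : Nat) (hj : j < ds.length) :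
    (ids.foldl (fun ds iD => (PySem.List.enumerate iD.toList).foldl pvAStep ds) ds)[j]? =
      some (ids.foldl (fun s iD =>
        match iD.toList[j]? with
        | some c => PySem.Set.add s (String.mk [c])
        | none => s) (ds.getD j PySem.Set.empty)) := by
  induction ids generalizing ds with
  | nil =>
      simp [List.getD_eq_getElem?_getD, List.getElem?_eq_getElem hj]
  | cons iD ids ih =>
      simp only [List.foldl_cons]
      have hlen : iD.toList.length ≤ ds.length := h iD (List.mem_cons_self ..)
      have hlen' : ((PySem.List.enumerate iD.toList (0:Int)).foldl pvAStep ds).length = ds.length :=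
        pvA_inner_length _ _ _
      rw [ih _ (fun x hx => by rw [hlen']; exact h x (List.mem_cons_of_mem _ hx)) (by omega)]
      congr 1
      have hget : (((PySem.List.enumerate iD.toList (0:Int)).foldl pvAStep ds).getD j PySem.Set.empty)
          = (match iD.toList[j]? with
             | some c => PySem.Set.add (ds.getD j PySem.Set.empty) (String.mk [c])
             | none => ds.getD j PySem.Set.empty) := by
        rw [List.getD_eq_getElem?_getD]
        have h0 : ((0 : Nat) : Int) = (0 : Int) := rfl
        rw [← h0, pvA_inner_get iD.toList 0 ds (by simpa using hlen) j hj]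
        simp
      rw [hget]

-- structural characterisation of B's zip-merge
theorem pvMerge_nil_left (cs : List Char) :
    pvMerge [] cs = cs.map (fun c => [String.mk [c]]) := by
  simp [pvMerge]

theorem pvMerge_nil_right (cols : List (List String)) : pvMerge cols [] = cols := by
  simp [pvMerge]

theorem pvMerge_cons (s : List String) (cols : List (List String)) (c : Char) (cs : List Char) :
    pvMerge (s :: cols) (c :: cs) = PySem.Set.add s (String.mk [c]) :: pvMerge cols cs := by
  simp [pvMerge, PySem.Set.union, PySem.Set.update, Nat.succ_min_succ]

theorem pvMerge_length (cols : List (List String)) (cs : List Char) :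
    (pvMerge cols cs).length = max cols.length cs.length := by
  induction cols generalizing cs with
  | nil => rw [pvMerge_nil_left]; simp
  | cons s cols ih =>
      cases cs with
      | nil => rw [pvMerge_nil_right]; simp
      | cons c cs => rw [pvMerge_cons]; simp [ih, Nat.succ_max_succ]

theorem pvMerge_getD (cols : List (List String)) (cs : List Char) (j : Nat) :
    (pvMerge cols cs).getD j [] =
      match cs[j]? with
      | some c => PySem.Set.add (cols.getD j []) (String.mk [c])
      | none => cols.getD j [] := by
  induction cols generalizing cs j with
  | nil =>
      rw [pvMerge_nil_left]
      rcases hc : cs[j]? with _ | c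
      · simp [List.getD_eq_getElem?_getD, hc]
      · simp [List.getD_eq_getElem?_getD, hc, PySem.Set.add, PySem.Set.contains]
  | cons s cols ih =>
      cases cs with
      | nil => rw [pvMerge_nil_right]; simp
      | cons c cs =>
          rw [pvMerge_cons]
          cases j with
          | zero => simp
          | succ j => simpa using ih cs j

-- B's fold, cell-wise and length-wise
theorem pvB_foldl_getD (ids : List String) (cols : List (List String)) (j : Nat) :
    ((ids.foldl (fun cols iD => pvMerge cols iD.toList) cols).getD j []) =
      ids.foldl (fun s iD =>
        match iD.toList[j]? with
        | some c => PySem.Set.add s (String.mk [c])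
        | none => s) (cols.getD j []) := by
  induction ids generalizing cols with
  | nil => rfl
  | cons iD ids ih =>
      simp only [List.foldl_cons]
      rw [ih, pvMerge_getD]

theorem pvB_foldl_length (ids : List String) (cols : List (List String)) :
    (ids.foldl (fun cols iD => pvMerge cols iD.toList) cols).length =
      ids.foldl (fun n iD => max n iD.toList.length) cols.length := by
  induction ids generalizing cols with
  | nil => rfl
  | cons iD ids ih =>
      simp only [List.foldl_cons]
      rw [ih, pvMerge_length]

-- A's ID_length (max of the Str.len's) is B's digits length, as a Nat fold
theorem pvIntFold_natFold (t : List String) (a : Nat) :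
    (t.map (fun iD => PySem.Str.len iD)).foldl max ((a : Nat) : Int) =
      ((t.foldl (fun n iD => max n iD.toList.length) a : Nat) : Int) := by
  induction t generalizing a with
  | nil => rfl
  | cons x t ih =>
      simp only [List.map_cons, List.foldl_cons]
      have hx : max ((a : Nat) : Int) (PySem.Str.len x) = ((max a x.toList.length : Nat) : Int) := by
        simp [PySem.Str.len]
      rw [hx, ih]

theorem pvL_eq (x : String) (t : List String) :
    ((PySem.List.max? ((x :: t).map (fun iD => PySem.Str.len iD)) (fun x => x)).getD 0)
      = (((x :: t).foldl (fun n iD => max n iD.toList.length) 0 : Nat) : Int) := by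
  rw [List.map_cons, PySem.List.max?_id_cons]
  simp only [Option.getD_some, List.foldl_cons, Nat.zero_max]
  have hx : PySem.Str.len x = ((x.toList.length : Nat) : Int) := by
    simp [PySem.Str.len]
  rw [hx, pvIntFold_natFold]

-- the two digits lists are equal (ids nonempty)
theorem pvDigits_eq (x : String) (t : List String) :
    (let L : Int := (PySem.List.max? ((x :: t).map (fun iD => PySem.Str.len iD)) (fun x => x)).getD 0
     (x :: t).foldl (fun ds iD => (PySem.List.enumerate iD.toList).foldl pvAStep ds)
       ((PySem.List.pyRange 0 L).map (fun _ => PySem.Set.empty)))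
    = (x :: t).foldl (fun cols iD => pvMerge cols iD.toList) [] := by
  set ids := x :: t with hids
  set L : Int := (PySem.List.max? (ids.map (fun iD => PySem.Str.len iD)) (fun x => x)).getD 0 with hL
  set N : Nat := ids.foldl (fun n iD => max n iD.toList.length) 0 with hN
  have hLN : L = (N : Int) := pvL_eq x t
  have hNmax : ∀ iD ∈ ids, iD.toList.length ≤ N := by
    have hmono : ∀ (l : List String) (a : Nat) (iD : String), iD ∈ l →
        iD.toList.length ≤ l.foldl (fun n iD => max n iD.toList.length) a := by
      intro l
      induction l with
      | nil => intro a iD h; simp at h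
      | cons y l ihl =>
          intro a iD h
          simp only [List.foldl_cons]
          rcases List.mem_cons.mp h with h | h
          · subst h
            have : ∀ (l : List String) (a b : Nat), a ≤ b →
                a ≤ l.foldl (fun n iD => max n iD.toList.length) b := by
              intro l
              induction l with
              | nil => intro a b hab; simpa using hab
              | cons z l ihz => intro a b hab; exact ihz a _ (le_trans hab (Nat.le_max_left _ _))
            exact this l _ _ (Nat.le_max_right _ _)
          · exact ihl _ iD h
    intro iD h
    exact hmono ids 0 iD h
  set ds0 : List (List String) := (PySem.List.pyRange 0 L).map (fun _ => PySem.Set.empty) with hds0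
  have hlen0 : ds0.length = N := by
    rw [hds0, List.length_map, pvRange_len, hLN]; simp
  have hid_len : ∀ iD ∈ ids, iD.toList.length ≤ ds0.length := by
    intro iD h; rw [hlen0]; exact hNmax iD h
  have hBlen : (ids.foldl (fun cols iD => pvMerge cols iD.toList) []).length = N := by
    rw [pvB_foldl_length]; rfl
  have hAlen : (ids.foldl (fun ds iD => (PySem.List.enumerate iD.toList).foldl pvAStep ds) ds0).length = N := by
    rw [pvA_outer_length, hlen0]
  apply List.ext_getElem?
  intro j
  by_cases hj : j < N
  · rw [pvA_exchange ids ds0 hid_len j (by omega)]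
    have hds0j : ds0.getD j PySem.Set.empty = PySem.Set.empty := by
      rw [hds0, List.getD_eq_getElem?_getD, List.getElem?_map, pvRange_get L j (by rw [hLN]; simpa using hj)]
      rfl
    rw [hds0j]
    have hBj : (ids.foldl (fun cols iD => pvMerge cols iD.toList) [])[j]? =
        some ((ids.foldl (fun cols iD => pvMerge cols iD.toList) []).getD j []) := by
      rw [List.getD_eq_getElem?_getD, List.getElem?_eq_getElem (by rw [hBlen]; exact hj)]
      rfl
    rw [hBj, pvB_foldl_getD]
    rfl
  · rw [List.getElem?_eq_none (by rw [hAlen]; omega), List.getElem?_eq_none (by rw [hBlen]; omega)]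

-- ===== VERDICT (by name: the statement is the Claim_ definition above) =====
theorem set_up_ID_table_spec : Claim_equal_set_up_ID_table := by
  intro ids _ hpre
  have hne : ids ≠ [] := by
    intro h; rw [h] at hpre; simp [Pre_set_up_ID_table] at hpre
  rcases ids with _ | ⟨x, t⟩
  · exact absurd rfl hne
  unfold Spec_set_up_ID_table set_up_ID_table set_up_ID_table_alt
  have h := pvDigits_eq x t
  simp only at h ⊢
  have hlen := pvB_foldl_length (x :: t) []
  simp only [List.length_nil] at hlen
  rw [h, pvL_eq x t, hlen]
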